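-- pv_equiv track=rewrite | github.com/luminaa/CSCI-135 | Class Works/Covid File Reading/ans.py | get_mentions_with_cough_cold_fever
-- ===== SOURCE A (Python) =====
-- def get_mentions_with_cough_cold_fever(dic):
--     cough_mentions = []
--     cold_mentions = []
--     fever_mentions = []
--
--     for user, comments in dic.items():
--         for comment in comments:
--             # If the comment mentions the words "cough", "cold", or "fever", add the user and their comment to the list of mentions
--             if "cough" in comment:
--                 cough_mentions.append([user, comment])
--             if "cold" in comment:
--                 cold_mentions.append([user, comment])
--             if "fever" in comment:
--                 fever_mentions.append([user, comment])
--
--     return cough_mentions, cold_mentions, fever_mentions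
-- ===== SOURCE B (Python) =====
-- def get_mentions_with_cough_cold_fever(dic):
--     def mentions(word):
--         return [[user, comment]
--                 for user, comments in dic.items()
--                 for comment in comments
--                 if word in comment]
--     return mentions("cough"), mentions("cold"), mentions("fever")
-- ===== Notes on version B (the rewrite author's own statement) =====
-- stated objective: simpler
-- what changed: Replaces A's single interleaved pass maintaining three accumulators with a reusable helper that performs three independent keyword scans, one per word.
import Mathlib
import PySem

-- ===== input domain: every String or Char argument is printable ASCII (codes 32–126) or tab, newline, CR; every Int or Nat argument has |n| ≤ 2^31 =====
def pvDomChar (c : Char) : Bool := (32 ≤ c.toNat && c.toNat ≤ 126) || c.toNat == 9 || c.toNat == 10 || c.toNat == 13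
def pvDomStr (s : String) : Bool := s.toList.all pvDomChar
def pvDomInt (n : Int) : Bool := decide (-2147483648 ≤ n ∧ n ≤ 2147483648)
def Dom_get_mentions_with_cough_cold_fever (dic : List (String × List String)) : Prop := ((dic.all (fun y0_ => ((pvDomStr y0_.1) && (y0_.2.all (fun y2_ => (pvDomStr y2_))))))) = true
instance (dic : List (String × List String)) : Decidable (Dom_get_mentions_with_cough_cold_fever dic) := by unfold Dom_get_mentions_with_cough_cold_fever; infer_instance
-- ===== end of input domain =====

-- B factors the single interleaved three-accumulator pass of A into one reusable helper run as three independent keyword scans (objective: simpler).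

-- ===== PORT A =====
-- A: one pass over dic.items() and each comment list, appending to three accumulators.
def get_mentions_with_cough_cold_fever (dic : List (String × List String)) : List (List String) × List (List String) × List (List String) :=
  let acc := dic.foldl (fun (acc : List (List String) × List (List String) × List (List String)) uc =>
    uc.2.foldl (fun acc comment =>
      let acc := if PySem.Str.isIn "cough" comment then (acc.1 ++ [[uc.1, comment]], acc.2.1, acc.2.2) else acc
      let acc := if PySem.Str.isIn "cold" comment then (acc.1, acc.2.1 ++ [[uc.1, comment]], acc.2.2) else acc
      let acc := if PySem.Str.isIn "fever" comment then (acc.1, acc.2.1, acc.2.2 ++ [[uc.1, comment]]) else acc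
      acc) acc) ([], [], [])
  (acc.1, acc.2.1, acc.2.2)

-- ===== PORT B =====
-- B: helper 'mentions word' = comprehension over items and comments filtering on one word; called three times.
def pvMentions (dic : List (String × List String)) (word : String) : List (List String) :=
  dic.flatMap (fun uc => (uc.2.filter (fun c => PySem.Str.isIn word c)).map (fun c => [uc.1, c]))

def get_mentions_with_cough_cold_fever_alt (dic : List (String × List String)) : List (List String) × List (List String) × List (List String) :=
  (pvMentions dic "cough", pvMentions dic "cold", pvMentions dic "fever")

-- ===== PRECONDITION & SPEC =====
def Spec_get_mentions_with_cough_cold_fever (dic : List (String × List String)) (out : List (List String) × List (List String) × List (List String)) : Prop := out = get_mentions_with_cough_cold_fever_alt dic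
instance (dic : List (String × List String)) (out : List (List String) × List (List String) × List (List String)) : Decidable (Spec_get_mentions_with_cough_cold_fever dic out) := by unfold Spec_get_mentions_with_cough_cold_fever; infer_instance

-- ===== CLAIM (what is proved, stated in full; the proofs are below) =====
def Claim_equal_get_mentions_with_cough_cold_fever : Prop := ∀ (dic : List (String × List String)), Dom_get_mentions_with_cough_cold_fever dic → Spec_get_mentions_with_cough_cold_fever dic (get_mentions_with_cough_cold_fever dic)

-- ===== LEMMAS AND PROOFS =====

-- One comment step of A appends to each component independently.
def pvOne (u : String) (word : String) (c : String) : List (List String) :=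
  if PySem.Str.isIn word c then [[u, c]] else []

-- inner loop characterisation
theorem pv_inner (u : String) (cs : List String)
    (acc : List (List String) × List (List String) × List (List String)) :
    cs.foldl (fun acc comment =>
      let acc := if PySem.Str.isIn "cough" comment then (acc.1 ++ [[u, comment]], acc.2.1, acc.2.2) else acc
      let acc := if PySem.Str.isIn "cold" comment then (acc.1, acc.2.1 ++ [[u, comment]], acc.2.2) else acc
      let acc := if PySem.Str.isIn "fever" comment then (acc.1, acc.2.1, acc.2.2 ++ [[u, comment]]) else acc
      acc) acc
    = (acc.1 ++ cs.flatMap (pvOne u "cough"),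
       acc.2.1 ++ cs.flatMap (pvOne u "cold"),
       acc.2.2 ++ cs.flatMap (pvOne u "fever")) := by
  induction cs generalizing acc with
  | nil => simp
  | cons c cs ih =>
    simp only [List.foldl_cons, List.flatMap_cons, ih]
    unfold pvOne
    split_ifs <;> simp

theorem pv_outer (dic : List (String × List String))
    (acc : List (List String) × List (List String) × List (List String)) :
    dic.foldl (fun (acc : List (List String) × List (List String) × List (List String)) uc =>
      uc.2.foldl (fun acc comment =>
        let acc := if PySem.Str.isIn "cough" comment then (acc.1 ++ [[uc.1, comment]], acc.2.1, acc.2.2) else acc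
        let acc := if PySem.Str.isIn "cold" comment then (acc.1, acc.2.1 ++ [[uc.1, comment]], acc.2.2) else acc
        let acc := if PySem.Str.isIn "fever" comment then (acc.1, acc.2.1, acc.2.2 ++ [[uc.1, comment]]) else acc
        acc) acc) acc
    = (acc.1 ++ pvMentions dic "cough",
       acc.2.1 ++ pvMentions dic "cold",
       acc.2.2 ++ pvMentions dic "fever") := by
  induction dic generalizing acc with
  | nil => simp [pvMentions]
  | cons uc rest ih =>
    rw [List.foldl_cons, pv_inner, ih]
    have h : ∀ w, uc.2.flatMap (pvOne uc.1 w)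
        = (uc.2.filter (fun c => PySem.Str.isIn w c)).map (fun c => [uc.1, c]) := by
      intro w
      induction uc.2 with
      | nil => simp
      | cons c cs ih2 =>
        simp only [List.flatMap_cons, List.filter_cons, pvOne]
        split_ifs <;> simp_all
    simp [pvMentions, h, List.append_assoc]

-- ===== VERDICT (by name: the statement is the Claim_ definition above) =====
theorem get_mentions_with_cough_cold_fever_spec : Claim_equal_get_mentions_with_cough_cold_fever := by
  intro dic _
  show get_mentions_with_cough_cold_fever dic = get_mentions_with_cough_cold_fever_alt dic
  unfold get_mentions_with_cough_cold_fever get_mentions_with_cough_cold_fever_alt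
  rw [pv_outer]
  simp
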